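-- pv_equiv track=rewrite | github.com/sylviasolo/Optimal_Strategies_in_RCV | utils.py | clean_aggre_dict_diff
-- ===== SOURCE A (Python) =====
-- from copy import deepcopy
--
-- def clean_aggre_dict_diff(anydict):
--     cleandict=deepcopy(anydict)
--     for key1 in cleandict.keys():
--         for key2 in cleandict.keys():
--             if key2[0:len(key1)]==key1 and key1!=key2:
--
--                 cleandict[key1] = cleandict[key1]-cleandict[key2]
--     final_dict = {x:y for x,y in cleandict.items() if y>0}
--     return final_dict
-- ===== SOURCE B (Python) =====
-- def clean_aggre_dict_diff(anydict):
--     # Index every key under each of its proper prefixes, so the extensions of a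
--     # key are found by one dict lookup instead of a scan over all keys.
--     index = {}
--     for key in anydict:
--         for i in range(len(key)):
--             index.setdefault(key[:i], []).append(key)
--     cur = dict(anydict)
--     for key in cur:
--         cur[key] = cur[key] - sum(cur[k2] for k2 in index.get(key, []))
--     return {k: v for k, v in cur.items() if v > 0}
-- ===== Notes on version B (the rewrite author's own statement) =====
-- stated objective: faster
-- what changed: Instead of comparing every key pair with a slice (nested loops), B builds a prefix index (proper prefix -> extending keys) once, then makes one pass over the keys in insertion order subtracting the current values of each key's indexed extensions.
import Mathlib
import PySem

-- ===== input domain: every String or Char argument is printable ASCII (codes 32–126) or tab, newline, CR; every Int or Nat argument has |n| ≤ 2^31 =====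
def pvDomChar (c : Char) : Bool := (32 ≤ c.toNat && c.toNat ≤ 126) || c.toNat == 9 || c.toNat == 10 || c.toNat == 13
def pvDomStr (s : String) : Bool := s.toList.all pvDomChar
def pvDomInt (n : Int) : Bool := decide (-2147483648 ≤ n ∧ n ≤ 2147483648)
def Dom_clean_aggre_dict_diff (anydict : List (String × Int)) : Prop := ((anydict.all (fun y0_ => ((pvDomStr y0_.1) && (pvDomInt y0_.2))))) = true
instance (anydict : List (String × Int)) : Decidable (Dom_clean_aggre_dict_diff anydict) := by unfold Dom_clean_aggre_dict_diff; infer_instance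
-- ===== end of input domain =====

-- B replaces A's all-pairs slice comparison by a prefix index built once, then one
-- in-order pass subtracting the current values of each key's indexed extensions (faster).

-- ===== PORT A =====
-- 'key2[0:len(key1)]==key1 and key1!=key2' (A's inner test, kept as a named helper)
def pvCondA (key1 key2 : String) : Bool :=
  (PySem.Str.slice key2 (some 0) (some (PySem.Str.len key1)) == key1) && (key1 != key2)

def clean_aggre_dict_diff (anydict : List (String × Int)) : List (String × Int) :=
  -- cleandict = deepcopy(anydict): the dict the input association list denotes
  let cleandict := PySem.Dict.ofList anydict
  let ks := cleandict.keys   -- .keys(): value-only updates below never change the key view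
  let d := ks.foldl (fun d key1 =>
    ks.foldl (fun d key2 =>
      if pvCondA key1 key2 then
        -- cleandict[key1] = cleandict[key1] - cleandict[key2]; both keys are
        -- present, so Python's d[k] is getD with an unused default
        d.insert key1 (d.getD key1 0 - d.getD key2 0)
      else d) d) cleandict
  -- {x:y for x,y in cleandict.items() if y>0}
  d.items.filter (fun p => decide (p.2 > 0))

-- ===== PORT B =====
def clean_aggre_dict_diff_alt (anydict : List (String × Int)) : List (String × Int) :=
  let cur0 := PySem.Dict.ofList anydict
  -- index: proper prefix -> keys extending it; setdefault(p, []).append(key) is modify p [] (· ++ [key])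
  let index := cur0.keys.foldl (fun ix key =>
      (PySem.List.pyRange 0 (PySem.Str.len key) 1).foldl (fun ix i =>
        ix.modify (PySem.Str.slice key (some 0) (some i)) [] (fun l => l ++ [key])) ix)
    PySem.Dict.empty
  -- for key in cur: cur[key] = cur[key] - sum(cur[k2] for k2 in index.get(key, []))
  let cur := cur0.keys.foldl (fun cur key =>
      cur.insert key (cur.getD key 0 - ((index.getD key []).map (fun k2 => cur.getD k2 0)).sum)) cur0
  cur.items.filter (fun p => decide (p.2 > 0))

-- ===== PRECONDITION & SPEC =====
def Spec_clean_aggre_dict_diff (anydict : List (String × Int)) (out : List (String × Int)) : Prop := out = clean_aggre_dict_diff_alt anydict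
instance (anydict : List (String × Int)) (out : List (String × Int)) : Decidable (Spec_clean_aggre_dict_diff anydict out) := by unfold Spec_clean_aggre_dict_diff; infer_instance

-- ===== CLAIM (what is proved, stated in full; the proofs are below) =====
def Claim_equal_clean_aggre_dict_diff : Prop := ∀ (anydict : List (String × Int)), Dom_clean_aggre_dict_diff anydict → Spec_clean_aggre_dict_diff anydict (clean_aggre_dict_diff anydict)

-- ===== LEMMAS AND PROOFS =====

theorem pvSlice_toList (k2 k1 : String) :
    (PySem.Str.slice k2 (some 0) (some (PySem.Str.len k1))).toList
      = k2.toList.take k1.toList.length := by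
  rw [PySem.Str.toList_slice, PySem.Chars.slice_eq_listSlice, PySem.Str.len_eq,
    PySem.List.slice_zero_start, PySem.List.slice_to_natCast]

theorem pvCondA_iff (k1 k2 : String) :
    pvCondA k1 k2 = true ↔
      k1.toList.length < k2.toList.length ∧ k2.toList.take k1.toList.length = k1.toList := by
  unfold pvCondA
  rw [Bool.and_eq_true, beq_iff_eq, bne_iff_ne]
  constructor
  · rintro ⟨h1, h2⟩
    have ht : k2.toList.take k1.toList.length = k1.toList := by
      rw [← pvSlice_toList k2 k1, h1]
    refine ⟨?_, ht⟩
    by_contra hle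
    rw [not_lt] at hle
    have : k2.toList = k1.toList := by
      rw [← ht, List.take_of_length_le hle]
    exact h2 (String.toList_inj.mp this.symm)
  · rintro ⟨hlt, ht⟩
    constructor
    · apply String.toList_inj.mp
      rw [pvSlice_toList, ht]
    · intro he
      rw [he] at hlt
      omega

theorem pvCondA_ne {k1 k2 : String} (h : pvCondA k1 k2 = true) : k2 ≠ k1 := by
  unfold pvCondA at h
  rw [Bool.and_eq_true, bne_iff_ne] at h
  exact fun he => h.2 he.symm

theorem pvRange_filter_take (L M : List Char) (m : Nat) (hm : m ≤ L.length) :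
    (List.range m).filter (fun j => decide (L.take j = M)) =
      if M.length < m ∧ L.take M.length = M then [M.length] else [] := by
  induction m with
  | zero => simp
  | succ n ih =>
    rw [List.range_succ, List.filter_append]
    rw [ih (by omega)]
    by_cases hn : L.take n = M
    · have hlen : M.length = n := by
        rw [← hn, List.length_take]; omega
      have h1 : ¬ (M.length < n ∧ L.take M.length = M) := by omega
      have h2 : M.length < n + 1 ∧ L.take M.length = M := by
        constructor
        · omega
        · rw [hlen]; exact hn
      rw [if_neg h1, if_pos h2]
      simp [hn, hlen]
    · by_cases hc : M.length < n ∧ L.take M.length = M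
      · have h2 : M.length < n + 1 ∧ L.take M.length = M := ⟨by omega, hc.2⟩
        rw [if_pos hc, if_pos h2]
        simp [hn]
      · have h2 : ¬ (M.length < n + 1 ∧ L.take M.length = M) := by
          rintro ⟨hlt, ht⟩
          apply hc
          rcases Nat.lt_or_ge M.length n with h|h
          · exact ⟨h, ht⟩
          · have : M.length = n := by omega
            rw [this] at ht
            exact absurd ht hn
        rw [if_neg hc, if_neg h2]
        simp [hn]

theorem pvSliceNat_toList (key : String) (j : Nat) :
    (PySem.Str.slice key (some 0) (some (j : Int))).toList = key.toList.take j := by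
  rw [PySem.Str.toList_slice, PySem.Chars.slice_eq_listSlice,
    PySem.List.slice_zero_start, PySem.List.slice_to_natCast]

theorem pvBucket_step (key c : String) (ix : PySem.Dict String (List String)) :
    ((PySem.List.pyRange 0 (PySem.Str.len key) 1).foldl (fun ix i =>
        ix.modify (PySem.Str.slice key (some 0) (some i)) [] (fun l => l ++ [key])) ix).getD c []
      = ix.getD c [] ++ (if pvCondA c key then [key] else []) := by
  rw [PySem.Str.len_eq, PySem.List.pyRange_zero_natCast, List.foldl_map]
  have hpairs : (List.range key.toList.length).foldl
      (fun ix (j : Nat) => ix.modify (PySem.Str.slice key (some 0) (some (j : Int))) [] (fun l => l ++ [key])) ix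
      = (((List.range key.toList.length).map
          (fun (j : Nat) => (PySem.Str.slice key (some 0) (some (j : Int)), key))).foldl
          (fun d p => d.modify p.1 [] (fun x => x ++ [p.2])) ix) := by
    rw [List.foldl_map]
  rw [hpairs, PySem.Dict.getD_foldl_modify_append]
  congr 1
  rw [List.filter_map, List.map_map]
  have hpred : ∀ j ∈ List.range key.toList.length,
      ((fun p => p.1 == c) ∘ fun (j : Nat) => (PySem.Str.slice key (some 0) (some (j : Int)), key)) j
        = decide (key.toList.take j = c.toList) := by
    intro j _
    simp only [Function.comp]
    rw [Bool.eq_iff_iff, beq_iff_eq, decide_eq_true_iff]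
    rw [← String.toList_inj, pvSliceNat_toList]
  rw [List.filter_congr hpred]
  rw [pvRange_filter_take key.toList c.toList _ le_rfl]
  by_cases hc : pvCondA c key = true
  · have h := (pvCondA_iff c key).mp hc
    rw [if_pos ⟨h.1, h.2⟩, if_pos hc]
    simp
  · have h : ¬ (c.toList.length < key.toList.length ∧ key.toList.take c.toList.length = c.toList) := by
      intro h'
      exact hc ((pvCondA_iff c key).mpr h')
    rw [if_neg h, if_neg hc]
    simp

theorem pvBucket (ks : List String) (ix : PySem.Dict String (List String)) (c : String) :
    (ks.foldl (fun ix key =>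
        (PySem.List.pyRange 0 (PySem.Str.len key) 1).foldl (fun ix i =>
          ix.modify (PySem.Str.slice key (some 0) (some i)) [] (fun l => l ++ [key])) ix) ix).getD c []
      = ix.getD c [] ++ ks.filter (fun k2 => pvCondA c k2) := by
  induction ks generalizing ix with
  | nil => simp
  | cons key ks ih =>
    rw [List.foldl_cons, ih, pvBucket_step, List.filter_cons, List.append_assoc]
    by_cases hc : pvCondA c key = true
    · rw [if_pos hc, if_pos hc]
      simp
    · rw [if_neg hc, if_neg hc]
      simp
theorem pvInsert_self (d : PySem.Dict String Int) (k : String)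
    (hnd : d.keys.Nodup) (hk : d.contains k = true) :
    d.insert k (d.getD k 0) = d := by
  apply PySem.Dict.ext
  rw [PySem.Dict.items_insert_of_contains d _ hk]
  have h : ∀ p ∈ d.items, (if (p.1 == k) = true then (k, d.getD k 0) else p) = p := by
    intro p hp
    by_cases hpk : (p.1 == k) = true
    · have hk1 : p.1 = k := eq_of_beq hpk
      have hv : d.getD p.1 0 = p.2 := PySem.Dict.getD_of_mem_items d hp hnd 0
      rw [if_pos hpk]
      rw [← hk1, hv]
    · rw [if_neg hpk]
  rw [List.map_congr_left h]
  simp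

theorem pvInnerA (l : List String) (d : PySem.Dict String Int) (k1 : String)
    (hnd : d.keys.Nodup) (hk : d.contains k1 = true) :
    l.foldl (fun d k2 => if pvCondA k1 k2 then d.insert k1 (d.getD k1 0 - d.getD k2 0) else d) d
      = d.insert k1 (d.getD k1 0 - ((l.filter (fun k2 => pvCondA k1 k2)).map (fun k2 => d.getD k2 0)).sum) := by
  induction l generalizing d with
  | nil =>
    simp only [List.foldl_nil, List.filter_nil, List.map_nil, List.sum_nil, sub_zero]
    exact (pvInsert_self d k1 hnd hk).symm
  | cons k2 l ih =>
    rw [List.foldl_cons, List.filter_cons]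
    by_cases hc : pvCondA k1 k2 = true
    · rw [if_pos hc, if_pos hc]
      set d' := d.insert k1 (d.getD k1 0 - d.getD k2 0) with hd'
      have hkeys : d'.keys = d.keys := PySem.Dict.keys_insert_of_contains d _ hk
      have hnd' : d'.keys.Nodup := by rw [hkeys]; exact hnd
      have hk' : d'.contains k1 = true := by
        rw [PySem.Dict.contains_iff_mem_keys] at hk ⊢
        rw [hkeys]; exact hk
      rw [ih d' hnd' hk']
      rw [hd', PySem.Dict.insert_insert_self]
      congr 1
      have hmap : ∀ k' ∈ l.filter (fun k2 => pvCondA k1 k2),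
          d'.getD k' 0 = d.getD k' 0 := by
        intro k' hk'mem
        have hcond := List.of_mem_filter hk'mem
        exact PySem.Dict.getD_insert_of_ne d _ _ (pvCondA_ne hcond)
      rw [PySem.Dict.getD_insert_self, List.map_congr_left hmap]
      simp only [List.map_cons, List.sum_cons]
      ring
    · rw [if_neg hc, if_neg hc]
      exact ih d hnd hk

theorem pvOuter (ksAll : List String) (F : String → List String)
    (hF : ∀ c, F c = ksAll.filter (fun k2 => pvCondA c k2))
    (l : List String) (d : PySem.Dict String Int)
    (hnd : d.keys.Nodup) (hl : ∀ k ∈ l, d.contains k = true) :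
    l.foldl (fun d k1 => ksAll.foldl (fun d k2 =>
        if pvCondA k1 k2 then d.insert k1 (d.getD k1 0 - d.getD k2 0) else d) d) d
      = l.foldl (fun d k1 =>
          d.insert k1 (d.getD k1 0 - ((F k1).map (fun k2 => d.getD k2 0)).sum)) d := by
  induction l generalizing d with
  | nil => rfl
  | cons k1 l ih =>
    rw [List.foldl_cons, List.foldl_cons]
    have hk1 : d.contains k1 = true := hl k1 List.mem_cons_self
    rw [pvInnerA ksAll d k1 hnd hk1, ← hF k1]
    set d' := d.insert k1 (d.getD k1 0 - ((F k1).map (fun k2 => d.getD k2 0)).sum) with hd'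
    have hkeys : d'.keys = d.keys := PySem.Dict.keys_insert_of_contains d _ hk1
    apply ih
    · rw [hkeys]; exact hnd
    · intro k hkmem
      rw [PySem.Dict.contains_iff_mem_keys, hkeys,
        ← PySem.Dict.contains_iff_mem_keys]
      exact hl k (List.mem_cons_of_mem _ hkmem)

-- ===== VERDICT (by name: the statement is the Claim_ definition above) =====
theorem clean_aggre_dict_diff_spec : Claim_equal_clean_aggre_dict_diff := by
  intro anydict _
  unfold Spec_clean_aggre_dict_diff
  simp only [clean_aggre_dict_diff, clean_aggre_dict_diff_alt]
  have hnd := PySem.Dict.nodup_keys_ofList (κ := String) (ν := Int) anydict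
  have hl : ∀ k ∈ (PySem.Dict.ofList anydict).keys,
      (PySem.Dict.ofList anydict).contains k = true :=
    fun k hk => (PySem.Dict.contains_iff_mem_keys _ _).mpr hk
  have hF : ∀ c,
      ((PySem.Dict.ofList anydict).keys.foldl (fun ix key =>
          (PySem.List.pyRange 0 (PySem.Str.len key) 1).foldl (fun ix i =>
            ix.modify (PySem.Str.slice key (some 0) (some i)) [] (fun l => l ++ [key])) ix)
        PySem.Dict.empty).getD c []
      = (PySem.Dict.ofList anydict).keys.filter (fun k2 => pvCondA c k2) := by
    intro c
    rw [pvBucket, PySem.Dict.getD_empty, List.nil_append]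
  rw [pvOuter (PySem.Dict.ofList anydict).keys _ hF (PySem.Dict.ofList anydict).keys
    (PySem.Dict.ofList anydict) hnd hl]
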